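-- pv_equiv track=rewrite | github.com/Vicentealoise3/legends_online | standings_cascade_points_desc.py | _normalize_team_from_full
-- ===== SOURCE A (Python) =====
-- def _normalize_team_from_full(full_name: str, allowed_shorts: set[str]) -> str | None:
--     if not full_name:
--         return None
--     fn = full_name.strip().lower()
--     # 1) por sufijo (p.ej. '... Blue Jays' -> 'Blue Jays')
--     for short in sorted(allowed_shorts, key=lambda s: -len(s)):
--         s = short.lower()
--         if fn.endswith(s):
--             return short
--     # 2) por presencia de palabra
--     for short in sorted(allowed_shorts, key=lambda s: -len(s)):
--         if f" {short.lower()} " in f" {fn} ":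
--             return short
--     return None
-- ===== SOURCE B (Python) =====
-- def _normalize_team_from_full(full_name, allowed_shorts):
--     # No sorting: keep the longest suffix match (first seen wins ties);
--     # only if there is none, keep the longest whole-word match the same way.
--     if not full_name:
--         return None
--     fn = full_name.strip().lower()
--     best = None
--     best_len = -1
--     for short in allowed_shorts:
--         if fn.endswith(short.lower()) and len(short) > best_len:
--             best, best_len = short, len(short)
--     if best is not None:
--         return best
--     padded = f" {fn} "
--     for short in allowed_shorts:
--         if len(short) > best_len and f" {short.lower()} " in padded:
--             best, best_len = short, len(short)
--     return best
-- ===== Notes on version B (the rewrite author's own statement) =====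
-- stated objective: simpler
-- what changed: Drops the two stable sorts: each of A's sorted early-return scans becomes a plain selection pass that keeps the first longest match (suffix matches first, whole-word matches only if no suffix match exists).
import Mathlib
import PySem

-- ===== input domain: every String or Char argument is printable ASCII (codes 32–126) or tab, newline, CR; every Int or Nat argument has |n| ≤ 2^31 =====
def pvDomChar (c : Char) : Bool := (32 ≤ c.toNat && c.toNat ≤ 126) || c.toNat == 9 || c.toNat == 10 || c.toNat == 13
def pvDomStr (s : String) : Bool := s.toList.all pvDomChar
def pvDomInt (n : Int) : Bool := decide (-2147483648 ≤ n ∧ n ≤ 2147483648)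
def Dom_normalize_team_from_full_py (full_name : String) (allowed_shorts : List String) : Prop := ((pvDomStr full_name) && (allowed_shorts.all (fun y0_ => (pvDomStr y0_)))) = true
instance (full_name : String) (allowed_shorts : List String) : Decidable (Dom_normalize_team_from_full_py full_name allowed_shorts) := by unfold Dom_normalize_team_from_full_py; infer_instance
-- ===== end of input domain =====

-- B replaces A's two stable-sorted early-return scans with plain selection passes that
-- keep the first longest match, no sorting; objective: simpler.

-- ===== PORT A =====
-- A: guard on empty string; strip+lower; two passes over the shorts sorted by
-- descending length (stable), returning the first suffix match, else the first
-- whole-word match, else none.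
def normalize_team_from_full_py (full_name : String) (allowed_shorts : List String) : Option String :=
  if full_name.toList = [] then none
  else
    let fn := PySem.Chars.lower (PySem.Chars.strip full_name.toList)
    let srt := PySem.List.sorted allowed_shorts (fun s => -((s.toList.length : Int)))
    match srt.find? (fun short => PySem.Chars.endswith fn (PySem.Chars.lower short.toList)) with
    | some short => some short
    | none =>
        srt.find? (fun short =>
          PySem.Chars.isIn (' ' :: (PySem.Chars.lower short.toList ++ [' '])) (' ' :: (fn ++ [' '])))

-- ===== PORT B =====
-- B: no sorting. One pass keeping the longest suffix match (first seen wins ties);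
-- only if there is none, a second pass keeping the longest whole-word match the same way.
def normalize_team_from_full_py_alt (full_name : String) (allowed_shorts : List String) : Option String :=
  if full_name.toList = [] then none
  else
    let fn := PySem.Chars.lower (PySem.Chars.strip full_name.toList)
    let p1 := allowed_shorts.foldl (fun acc short =>
        if PySem.Chars.endswith fn (PySem.Chars.lower short.toList) ∧
            (short.toList.length : Int) > acc.2 then
          (some short, (short.toList.length : Int))
        else acc) ((none : Option String), -1)
    match p1.1 with
    | some b => some b
    | none =>
        let padded := ' ' :: (fn ++ [' '])
        (allowed_shorts.foldl (fun acc short =>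
          if (short.toList.length : Int) > acc.2 ∧
              PySem.Chars.isIn (' ' :: (PySem.Chars.lower short.toList ++ [' '])) padded then
            (some short, (short.toList.length : Int))
          else acc) ((none : Option String), -1)).1

-- ===== PRECONDITION & SPEC =====
def Spec_normalize_team_from_full_py (full_name : String) (allowed_shorts : List String) (out : Option String) : Prop := out = normalize_team_from_full_py_alt full_name allowed_shorts
instance (full_name : String) (allowed_shorts : List String) (out : Option String) : Decidable (Spec_normalize_team_from_full_py full_name allowed_shorts out) := by unfold Spec_normalize_team_from_full_py; infer_instance

-- ===== CLAIM (what is proved, stated in full; the proofs are below) =====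
def Claim_equal_normalize_team_from_full_py : Prop := ∀ (full_name : String) (allowed_shorts : List String), Dom_normalize_team_from_full_py full_name allowed_shorts → Spec_normalize_team_from_full_py full_name allowed_shorts (normalize_team_from_full_py full_name allowed_shorts)

-- ===== LEMMAS AND PROOFS =====

-- appending one element on the right inserts it into the stable sort
lemma sorted_append_singleton {α : Type} (key : α → Int) (l : List α) (x : α) :
    PySem.List.sorted (l ++ [x]) key =
      PySem.List.insertBy (fun a b => decide (key a < key b)) x (PySem.List.sorted l key) := by
  rw [PySem.List.sorted_eq_foldl_insertBy, PySem.List.sorted_eq_foldl_insertBy,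
    List.foldl_append]
  rfl

-- find? over a sorted list after inserting x: x wins exactly when it matches and its
-- key is strictly smaller than the key of the previous first match.
lemma find?_insertBy_sorted {α : Type} (key : α → Int) (P : α → Bool) (x : α) (s : List α)
    (hs : s.Pairwise (fun a b => key a ≤ key b)) :
    List.find? P (PySem.List.insertBy (fun a b => decide (key a < key b)) x s) =
      (List.find? P s).elim (if P x then some x else none)
        (fun y => if key x < key y ∧ P x = true then some x else some y) := by
  induction s with
  | nil => simp [PySem.List.insertBy]
  | cons z s' ih =>
    have hz : ∀ y ∈ s', key z ≤ key y := (List.pairwise_cons.mp hs).1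
    have hs' : s'.Pairwise (fun a b => key a ≤ key b) := (List.pairwise_cons.mp hs).2
    by_cases hxz : key x < key z
    · rw [show PySem.List.insertBy (fun a b => decide (key a < key b)) x (z :: s')
          = x :: z :: s' by simp [PySem.List.insertBy, hxz]]
      cases hPx : P x with
      | true =>
        rw [List.find?_cons_of_pos hPx]
        cases hfind : List.find? P (z :: s') with
        | none => simp [hfind, hPx]
        | some y =>
          have hy : y ∈ z :: s' := List.mem_of_find?_eq_some hfind
          have hky : key z ≤ key y := by
            rcases List.mem_cons.mp hy with h | h
            · simp [h]
            · exact hz y h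
          simp [hfind, hPx, lt_of_lt_of_le hxz hky]
      | false =>
        rw [show List.find? P (x :: z :: s') = List.find? P (z :: s') from
          List.find?_cons_of_neg (by simp [hPx])]
        cases hfind : List.find? P (z :: s') with
        | none => simp [hfind, hPx]
        | some y => simp [hfind, hPx]
    · rw [show PySem.List.insertBy (fun a b => decide (key a < key b)) x (z :: s')
          = z :: PySem.List.insertBy (fun a b => decide (key a < key b)) x s' by
            simp [PySem.List.insertBy, hxz]]
      cases hPz : P z with
      | true =>
        rw [show List.find? P (z :: PySem.List.insertBy (fun a b => decide (key a < key b)) x s')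
            = some z from List.find?_cons_of_pos hPz,
          show List.find? P (z :: s') = some z from List.find?_cons_of_pos hPz]
        simp [hxz]
      | false =>
        rw [show List.find? P (z :: PySem.List.insertBy (fun a b => decide (key a < key b)) x s')
            = List.find? P (PySem.List.insertBy (fun a b => decide (key a < key b)) x s') from
          List.find?_cons_of_neg (by simp [hPz]),
          show List.find? P (z :: s') = List.find? P s' from
          List.find?_cons_of_neg (by simp [hPz])]
        exact ih hs'

-- proof-side names: A's sort key and A's sorted list
def pvKey (s : String) : Int := -((s.toList.length : Int))

def pvSrt (l : List String) : List String :=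
  PySem.List.sorted l pvKey

-- the invariant of B's selection pass: its best element is exactly the first match
-- of A's corresponding scan over the length-sorted list
lemma pvSel_spec (P : String → Bool)
    (step : (Option String × Int) → String → (Option String × Int))
    (hstep : ∀ acc x, step acc x =
      if P x = true ∧ ((x.toList.length : Int) > acc.2) then
        (some x, (x.toList.length : Int))
      else acc)
    (l : List String) :
    ((l.foldl step ((none : Option String), -1)).1 = none →
        (l.foldl step ((none : Option String), -1)).2 = -1 ∧
        List.find? P (pvSrt l) = none) ∧
    (∀ b, (l.foldl step ((none : Option String), -1)).1 = some b →
        (l.foldl step ((none : Option String), -1)).2 = (b.toList.length : Int) ∧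
        List.find? P (pvSrt l) = some b) := by
  induction l using List.reverseRecOn with
  | nil =>
    exact ⟨fun _ => ⟨rfl, rfl⟩, fun b hb => absurd hb (by simp)⟩
  | append_singleton l x ih =>
    have hS : List.find? P (pvSrt (l ++ [x])) =
        (List.find? P (pvSrt l)).elim (if P x then some x else none)
          (fun y => if pvKey x < pvKey y ∧ P x = true then some x else some y) := by
      unfold pvSrt
      rw [sorted_append_singleton pvKey]
      exact find?_insertBy_sorted pvKey P x _ (PySem.List.sorted_pairwise l pvKey)
    rw [List.foldl_append, List.foldl_cons, List.foldl_nil, hstep, hS]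
    rcases hst : l.foldl step ((none : Option String), -1) with ⟨b?, m⟩
    rw [hst] at ih
    dsimp only at ih
    cases b? with
    | none =>
      obtain ⟨hm, hf⟩ := ih.1 rfl
      rw [hf]
      cases hPx : P x with
      | true =>
        rw [if_pos ⟨rfl, by omega⟩]
        refine ⟨fun h => absurd h (by simp), fun c hc => ?_⟩
        obtain rfl : x = c := by simpa using hc
        exact ⟨rfl, by simp [hPx]⟩
      | false =>
        rw [if_neg (by simp)]
        exact ⟨fun _ => ⟨hm, by simp⟩, fun c hc => absurd hc (by simp)⟩
    | some b =>
      obtain ⟨hm, hf⟩ := ih.2 b rfl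
      rw [hf]
      cases hPx : P x with
      | true =>
        by_cases hlen : (x.toList.length : Int) > m
        · rw [if_pos ⟨rfl, hlen⟩]
          have hk : pvKey x < pvKey b := by
            rw [show pvKey x = -((x.toList.length : Int)) from rfl,
              show pvKey b = -((b.toList.length : Int)) from rfl]
            omega
          refine ⟨fun h => absurd h (by simp), fun c hc => ?_⟩
          obtain rfl : x = c := by simpa using hc
          exact ⟨rfl, by simp [hPx, hk]⟩
        · rw [if_neg (fun h => hlen h.2)]
          have hk : ¬ pvKey x < pvKey b := by
            rw [show pvKey x = -((x.toList.length : Int)) from rfl,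
              show pvKey b = -((b.toList.length : Int)) from rfl]
            omega
          refine ⟨fun h => absurd h (by simp), fun c hc => ?_⟩
          obtain rfl : b = c := by simpa using hc
          exact ⟨hm, by simp [hk]⟩
      | false =>
        rw [if_neg (by simp)]
        refine ⟨fun h => absurd h (by simp), fun c hc => ?_⟩
        obtain rfl : b = c := by simpa using hc
        exact ⟨hm, by simp⟩

-- ===== VERDICT (by name: the statement is the Claim_ definition above) =====
theorem normalize_team_from_full_py_spec : Claim_equal_normalize_team_from_full_py := by
  intro full_name allowed_shorts _
  unfold Spec_normalize_team_from_full_py normalize_team_from_full_py normalize_team_from_full_py_alt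
  by_cases hempty : full_name.toList = []
  · simp [hempty]
  · simp only [hempty, if_false]
    set fn := PySem.Chars.lower (PySem.Chars.strip full_name.toList) with hfn
    set P2 : String → Bool := fun short => PySem.Chars.endswith fn (PySem.Chars.lower short.toList) with hP2
    set P1 : String → Bool := fun short =>
      PySem.Chars.isIn (' ' :: (PySem.Chars.lower short.toList ++ [' '])) (' ' :: (fn ++ [' '])) with hP1
    have hsrtd : PySem.List.sorted allowed_shorts (fun s => -((s.toList.length : Int)))
        = pvSrt allowed_shorts := rfl
    rw [hsrtd]
    obtain ⟨hn1, hs1⟩ := pvSel_spec P2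
      (fun acc short =>
        if PySem.Chars.endswith fn (PySem.Chars.lower short.toList) ∧
            (short.toList.length : Int) > acc.2 then
          (some short, (short.toList.length : Int))
        else acc)
      (fun acc x => rfl) allowed_shorts
    obtain ⟨hn2, hs2⟩ := pvSel_spec P1
      (fun acc short =>
        if (short.toList.length : Int) > acc.2 ∧
            PySem.Chars.isIn (' ' :: (PySem.Chars.lower short.toList ++ [' ']))
              (' ' :: (fn ++ [' '])) then
          (some short, (short.toList.length : Int))
        else acc)
      (fun acc x => by
        dsimp only
        by_cases h : P1 x = true ∧ ((x.toList.length : Int) > acc.2)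
        · rw [if_pos ⟨h.2, h.1⟩, if_pos h]
        · rw [if_neg (fun hc => h ⟨hc.2, hc.1⟩), if_neg h]) allowed_shorts
    rcases hst1 : (allowed_shorts.foldl
        (fun acc short =>
          if PySem.Chars.endswith fn (PySem.Chars.lower short.toList) ∧
              (short.toList.length : Int) > acc.2 then
            (some short, (short.toList.length : Int))
          else acc) ((none : Option String), -1)).1 with _ | b
    · rw [(hn1 hst1).2]
      dsimp only
      rcases hst2 : (allowed_shorts.foldl
          (fun acc short =>
            if (short.toList.length : Int) > acc.2 ∧
                PySem.Chars.isIn (' ' :: (PySem.Chars.lower short.toList ++ [' ']))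
                  (' ' :: (fn ++ [' '])) then
              (some short, (short.toList.length : Int))
            else acc) ((none : Option String), -1)).1 with _ | c
      · rw [(hn2 hst2).2]
      · rw [(hs2 c hst2).2]
    · rw [(hs1 b hst1).2]
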